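-- pv_equiv track=rewrite | github.com/WincerChan/bindery | bindery/css.py | validate_css
-- ===== SOURCE A (Python) =====
-- from typing import Optional
--
-- MAX_CSS_LENGTH = 200_000
--
-- def validate_css(raw: str) -> Optional[str]:
--     if not raw or not raw.strip():
--         return None
--
--     if len(raw) > MAX_CSS_LENGTH:
--         return f"CSS 过长（超过 {MAX_CSS_LENGTH} 字符）"
--     if "\x00" in raw:
--         return "CSS 包含非法字符"
--
--     depth = 0
--     in_string: Optional[str] = None
--     escape = False
--     i = 0
--     while i < len(raw):
--         ch = raw[i]
--         if in_string:
--             if escape: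
--                 escape = False
--             elif ch == "\\":
--                 escape = True
--             elif ch == in_string:
--                 in_string = None
--             i += 1
--             continue
--
--         if ch in ("'", '"'):
--             in_string = ch
--             i += 1
--             continue
--
--         if ch == "/" and i + 1 < len(raw) and raw[i + 1] == "*":
--             end = raw.find("*/", i + 2)
--             if end == -1:
--                 return "CSS 注释未闭合"
--             i = end + 2
--             continue
--
--         if ch == "{":
--             depth += 1
--         elif ch == "}":
--             depth -= 1
--             if depth < 0:
--                 return "CSS 花括号不匹配"
--
--         i += 1
--
--     if in_string:
--         return "CSS 字符串未闭合"
--     if depth != 0: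
--         return "CSS 花括号不匹配"
--     return None
-- ===== SOURCE B (Python) =====
-- from typing import Optional
--
-- MAX_CSS_LENGTH = 200_000
--
-- def validate_css(raw: str) -> Optional[str]:
--     if raw.strip() == "":
--         return None
--
--     if len(raw) > MAX_CSS_LENGTH:
--         return f"CSS 过长（超过 {MAX_CSS_LENGTH} 字符）"
--     if "\x00" in raw:
--         return "CSS 包含非法字符"
--
--     depth = 0
--     quote: Optional[str] = None
--     escape = False
--     in_comment = False
--     star = False   # previous comment char was '*'
--     slash = False  # previous plain char was '/'
--     for ch in raw:
--         if in_comment: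
--             if star and ch == "/":
--                 in_comment = False
--                 star = False
--             else:
--                 star = ch == "*"
--         elif quote:
--             if escape:
--                 escape = False
--             elif ch == "\\":
--                 escape = True
--             elif ch == quote:
--                 quote = None
--         elif slash and ch == "*":
--             in_comment = True
--             slash = False
--         else:
--             if ch in ("'", '"'):
--                 quote = ch
--             elif ch == "{":
--                 depth += 1
--             elif ch == "}":
--                 depth -= 1
--                 if depth < 0:
--                     return "CSS 花括号不匹配"
--             slash = ch == "/"
--     if in_comment:
--         return "CSS 注释未闭合"
--     if quote:
--         return "CSS 字符串未闭合"
--     if depth != 0: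
--         return "CSS 花括号不匹配"
--     return None
-- ===== Notes on version B (the rewrite author's own statement) =====
-- stated objective: alternative
-- what changed: Replaced A's index-based while loop with lookahead raw[i+1] and str.find-based comment skipping/jumping by a uniform for-each-character state machine that always advances one char, carrying in_comment/star/slash flags that look one character behind instead of ahead.
import Mathlib
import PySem

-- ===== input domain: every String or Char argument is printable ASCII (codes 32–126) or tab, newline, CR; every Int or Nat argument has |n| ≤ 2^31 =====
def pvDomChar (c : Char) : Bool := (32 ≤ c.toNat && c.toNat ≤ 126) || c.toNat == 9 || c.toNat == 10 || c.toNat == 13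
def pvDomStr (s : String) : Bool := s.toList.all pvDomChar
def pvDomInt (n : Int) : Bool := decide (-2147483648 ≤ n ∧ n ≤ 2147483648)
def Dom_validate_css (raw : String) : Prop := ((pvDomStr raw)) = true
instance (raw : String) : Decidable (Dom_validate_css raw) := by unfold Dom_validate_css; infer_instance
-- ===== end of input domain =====

-- B replaces A's index/lookahead loop (with str.find comment skipping) by a uniform one-char-at-a-time
-- state machine with look-behind flags; same O(n), structurally different decomposition.

-- ===== PORT A =====
-- A's while loop: index i, depth, in_string, escape; comment skipped by raw.find("*/", i+2) and a jump.
def loopA (cs : List Char) : Nat → Nat → Int → Option Char → Bool → Option String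
  | 0, _, _, _, _ => none   -- fuel guard only; never reached from validate_css (fuel > iterations)
  | fuel+1, i, depth, instr, esc =>
    if h : i < cs.length then
      let ch := cs[i]
      match instr with
      | some q =>
        if esc then loopA cs fuel (i+1) depth instr false
        else if ch = '\\' then loopA cs fuel (i+1) depth instr true
        else if ch = q then loopA cs fuel (i+1) depth none esc
        else loopA cs fuel (i+1) depth instr esc
      | none =>
        if ch = '\'' ∨ ch = '"' then loopA cs fuel (i+1) depth (some ch) esc
        else if h2 : ch = '/' ∧ (i+1 < cs.length ∧ cs[i+1]? = some '*') then
          -- raw.find("*/", i + 2)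
          let e := PySem.Chars.findFrom cs ['*', '/'] ((i+2 : Nat) : Int) none
          if e = -1 then some "CSS 注释未闭合"
          else loopA cs fuel (e.toNat + 2) depth instr esc
        else if ch = '{' then loopA cs fuel (i+1) (depth+1) instr esc
        else if ch = '}' then
          if depth - 1 < 0 then some "CSS 花括号不匹配"
          else loopA cs fuel (i+1) (depth-1) instr esc
        else loopA cs fuel (i+1) depth instr esc
    else
      match instr with
      | some _ => some "CSS 字符串未闭合"
      | none => if depth ≠ 0 then some "CSS 花括号不匹配" else none

def validate_css (raw : String) : Option String :=
  let cs := raw.toList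
  if cs = [] ∨ PySem.Chars.strip cs = [] then none
  else if 200000 < cs.length then some "CSS 过长（超过 200000 字符）"
  else if PySem.Chars.isIn [Char.ofNat 0] cs then some "CSS 包含非法字符"
  else loopA cs (cs.length + 1) 0 0 none false

-- ===== PORT B =====
-- B's for-each-char state machine: depth, quote, escape, in_comment, star (prev comment char '*'),
-- slash (prev plain char '/').
def loopB : List Char → Int → Option Char → Bool → Bool → Bool → Bool → Option String
  | [], depth, quote, _esc, inCom, _star, _slash =>
      if inCom then some "CSS 注释未闭合"
      else match quote with
        | some _ => some "CSS 字符串未闭合"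
        | none => if depth ≠ 0 then some "CSS 花括号不匹配" else none
  | ch :: rest, depth, quote, esc, inCom, star, slash =>
      if inCom then
        if star && ch = '/' then loopB rest depth quote esc false false slash
        else loopB rest depth quote esc inCom (ch = '*') slash
      else match quote with
        | some q =>
          if esc then loopB rest depth quote false inCom star slash
          else if ch = '\\' then loopB rest depth quote true inCom star slash
          else if ch = q then loopB rest depth none esc inCom star slash
          else loopB rest depth quote esc inCom star slash
        | none =>
          if slash && ch = '*' then loopB rest depth quote esc true star false
          else
            if ch = '\'' ∨ ch = '"' then loopB rest depth (some ch) esc inCom star (ch = '/')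
            else if ch = '{' then loopB rest (depth+1) quote esc inCom star (ch = '/')
            else if ch = '}' then
              if depth - 1 < 0 then some "CSS 花括号不匹配"
              else loopB rest (depth-1) quote esc inCom star (ch = '/')
            else loopB rest depth quote esc inCom star (ch = '/')

def validate_css_alt (raw : String) : Option String :=
  let cs := raw.toList
  if PySem.Chars.strip cs = [] then none
  else if 200000 < cs.length then some "CSS 过长（超过 200000 字符）"
  else if PySem.Chars.isIn [Char.ofNat 0] cs then some "CSS 包含非法字符"
  else loopB cs 0 none false false false false

-- ===== PRECONDITION & SPEC =====
def Spec_validate_css (raw : String) (out : Option String) : Prop := out = validate_css_alt raw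
instance (raw : String) (out : Option String) : Decidable (Spec_validate_css raw out) := by unfold Spec_validate_css; infer_instance

-- ===== CLAIM (what is proved, stated in full; the proofs are below) =====
def Claim_equal_validate_css : Prop := ∀ (raw : String), Dom_validate_css raw → Spec_validate_css raw (validate_css raw)

-- ===== LEMMAS AND PROOFS =====

-- leftover slash flag is irrelevant unless the next char is '*'
theorem loopB_slash_irrel (l : List Char) (d : Int) (esc : Bool)
    (h : l.head? ≠ some '*') :
    loopB l d none esc false false true = loopB l d none esc false false false := by
  cases l with
  | nil => rfl
  | cons c t =>
    have hc : c ≠ '*' := by simpa using h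
    simp [loopB, hc]

-- inside an unclosed comment, B scans to the end and reports it
theorem loopB_scan_noclose (l : List Char) (star : Bool) (d : Int) (q : Option Char) (esc : Bool)
    (hinf : ¬ ['*', '/'] <:+: l)
    (hstar : star = true → l.head? ≠ some '/') :
    loopB l d q esc true star false = some "CSS 注释未闭合" := by
  induction l generalizing star with
  | nil => simp [loopB]
  | cons c t ih =>
    have hno : ¬ (star && c = '/') = true := by
      intro hcl
      simp only [Bool.and_eq_true, decide_eq_true_eq] at hcl
      exact hstar hcl.1 (by simp [hcl.2])
    simp only [loopB, if_neg hno]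
    apply ih
    · intro hi; exact hinf (hi.trans (List.suffix_cons c t).isInfix)
    · intro hst hh
      simp only [decide_eq_true_eq] at hst
      apply hinf
      cases t with
      | nil => simp at hh
      | cons c2 t2 =>
        simp only [List.head?_cons, Option.some.injEq] at hh
        exact ⟨[], t2, by simp [hst, hh]⟩

-- inside a comment, B scans to the first "*/" and resumes after it
theorem loopB_scan_close (l1 : List Char) (l2 : List Char) (star : Bool) (d : Int) (q : Option Char) (esc : Bool)
    (hstar : star = true → (l1 ++ '*' :: '/' :: l2).head? ≠ some '/')
    (hmin : ∀ j, ['*', '/'] <+: (l1 ++ '*' :: '/' :: l2).drop j → l1.length ≤ j) :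
    loopB (l1 ++ '*' :: '/' :: l2) d q esc true star false = loopB l2 d q esc false false false := by
  induction l1 generalizing star with
  | nil =>
    have h1 : ¬ (star && ('*' : Char) = '/') = true := by simp
    simp [loopB]
  | cons c t ih =>
    have hno : ¬ (star && c = '/') = true := by
      intro hcl
      simp only [Bool.and_eq_true, decide_eq_true_eq] at hcl
      exact hstar hcl.1 (by simp [hcl.2])
    simp only [List.cons_append, loopB, if_neg hno]
    apply ih
    · intro hst hh
      simp only [decide_eq_true_eq] at hst
      have : ['*', '/'] <+: ((c :: t ++ '*' :: '/' :: l2).drop 0) := by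
        cases t with
        | nil => simp at hh
        | cons c2 t2 =>
          simp only [List.cons_append, List.head?_cons, Option.some.injEq] at hh
          simp [hst, hh, List.cons_prefix_cons]
      have := hmin 0 this
      simp at this
    · intro j hj
      have := hmin (j+1) (by simpa using hj)
      simpa using Nat.le_of_succ_le_succ this

-- the main loop equivalence: A at index i ≃ B on the remaining suffix
theorem loop_main (cs : List Char) (n : Nat) : ∀ (i : Nat), cs.length - i < n → ∀ (d : Int) (q : Option Char) (esc : Bool),
    loopA cs n i d q esc = loopB (cs.drop i) d q esc false false false := by
  induction n with
  | zero =>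
    intro i hn
    exact absurd hn (by omega)
  | succ m ih =>
    intro i hn d q esc
    by_cases h : i < cs.length
    · have hdrop : cs.drop i = cs[i] :: cs.drop (i+1) := List.drop_eq_getElem_cons h
      rw [loopA.eq_def]
      simp only [dif_pos h]
      cases q with
      | some qc =>
        rw [hdrop]
        cases esc with
        | true =>
          simp only [if_pos rfl, loopB]
          simp only [Bool.false_eq_true, if_false, if_pos rfl]
          exact ih (i+1) (by omega) d (some qc) false
        | false =>
          by_cases hb : cs[i] = '\\'
          · simp [loopB, hb]
            exact ih (i+1) (by omega) d (some qc) true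
          · by_cases hqc : cs[i] = qc
            · have hb' : qc ≠ '\\' := hqc ▸ hb
              simp [loopB, hb, hqc, hb']
              exact ih (i+1) (by omega) d none false
            · simp [loopB, hb, hqc]
              exact ih (i+1) (by omega) d (some qc) false
      | none =>
        by_cases hq : cs[i] = '\'' ∨ cs[i] = '"'
        · have hns : cs[i] ≠ '/' := by rcases hq with h' | h' <;> simp [h']
          rw [hdrop]
          simp [loopB, hq, hns]
          exact ih (i+1) (by omega) d (some cs[i]) esc
        · simp only [if_neg hq]
          by_cases h2 : cs[i] = '/' ∧ (i+1 < cs.length ∧ cs[i+1]? = some '*')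
          · -- comment branch
            obtain ⟨hsl, hlt, hst⟩ := h2
            have hst' : cs[i+1]'hlt = '*' := by
              have := List.getElem?_eq_getElem hlt
              rw [this] at hst; simpa using hst
            have hdrop2 : cs.drop (i+1) = cs[i+1] :: cs.drop (i+2) := List.drop_eq_getElem_cons hlt
            have hcond : cs[i] = '/' ∧ (i+1 < cs.length ∧ cs[i+1]? = some '*') := ⟨hsl, hlt, hst⟩
            simp only [dif_pos hcond]
            set l := cs.drop (i+2) with hl
            have hff : PySem.Chars.findFrom cs ['*', '/'] ((i+2 : Nat) : Int) none =
                if PySem.Chars.find l ['*', '/'] = -1 then -1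
                else ((i+2 : Nat) : Int) + PySem.Chars.find l ['*', '/'] := by
              simpa using PySem.Chars.findFrom_natCast cs ['*', '/'] (i+2) (by omega)
            -- B side: two steps into the comment
            rw [hdrop, hdrop2]
            have hBsteps : loopB (cs[i] :: cs[i+1] :: l) d none esc false false false
                = loopB l d none esc true false false := by
              simp [loopB, hsl, hst']
            rw [hBsteps]
            by_cases hfind : PySem.Chars.find l ['*', '/'] = -1
            · rw [hff, if_pos hfind, if_pos rfl]
              have hninf : ¬ ['*', '/'] <:+: l := (PySem.Chars.find_eq_neg_one_iff l ['*', '/']).1 hfind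
              exact (loopB_scan_noclose l false d none esc hninf (by simp)).symm
            · rw [hff, if_neg hfind]
              have hpos : 0 ≤ PySem.Chars.find l ['*', '/'] := by
                rcases (PySem.Chars.neg_one_le_find l ['*', '/']).lt_or_eq with h' | h'
                · omega
                · exact absurd h'.symm hfind
              set p := (PySem.Chars.find l ['*', '/']).toNat with hp
              have hspec := PySem.Chars.find_spec (s := l) (sub := ['*', '/']) hpos
              obtain ⟨hpre, hminp⟩ := hspec
              have hsplit : l.drop p = '*' :: '/' :: l.drop (p+2) := by
                obtain ⟨t, ht⟩ := hpre
                have h2t : t = l.drop (p + 2) := by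
                  have h3 := congrArg (List.drop 2) ht
                  simp [List.drop_drop] at h3
                  exact h3.trans (by congr 1 <;> omega)
                rw [← ht, h2t]
                rfl
              have hplen : p + 2 ≤ l.length := by
                have := congrArg List.length hsplit
                simp [List.length_drop] at this
                omega
              have hltake : l = l.take p ++ '*' :: '/' :: l.drop (p+2) := by
                conv_lhs => rw [← List.take_append_drop p l]
                rw [hsplit]
              have hE : ¬ ((i+2 : Nat) : Int) + PySem.Chars.find l ['*', '/'] = -1 := by omega
              rw [if_neg hE]
              have hEnat : (((i+2 : Nat) : Int) + PySem.Chars.find l ['*', '/']).toNat + 2 = i + 4 + p := by omega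
              rw [hEnat]
              have hIH := ih (i+4+p) (by omega) d none esc
              rw [hIH]
              have hBclose : loopB l d none esc true false false
                  = loopB (l.drop (p+2)) d none esc false false false := by
                conv_lhs => rw [hltake]
                refine loopB_scan_close (l.take p) (l.drop (p+2)) false d none esc (by simp) ?_
                intro j hj
                rw [← hltake] at hj
                have hlen2 : (l.take p).length = p := by
                  rw [List.length_take]; omega
                rw [hlen2]
                by_contra hlt2
                exact hminp j (by omega) hj
              rw [hBclose]
              congr 1
              rw [hl]
              rw [List.drop_drop]
              congr 1
              omega
          · -- ordinary char (not quote, not comment opener)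
            simp only [dif_neg h2]
            by_cases hbr : cs[i] = '{'
            · rw [hdrop]
              have : cs[i] ≠ '/' := by simp [hbr]
              simp [loopB, hq, hbr, this]
              exact ih (i+1) (by omega) (d+1) none esc
            · by_cases hbr2 : cs[i] = '}'
              · have : cs[i] ≠ '/' := by simp [hbr2]
                rw [hdrop]
                by_cases hd : d - 1 < 0
                · simp [loopB, hq, hbr, hbr2, this, hd]
                · simp [loopB, hq, hbr, hbr2, this, hd]
                  exact ih (i+1) (by omega) (d-1) none esc
              · -- neither brace; maybe '/'
                by_cases hsl : cs[i] = '/'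
                · -- '/' not followed by '*'
                  rw [hdrop]
                  simp [loopB, hq, hbr, hbr2, hsl]
                  have hnext : (cs.drop (i+1)).head? ≠ some '*' := by
                    intro hcontr
                    rw [List.head?_drop] at hcontr
                    have hlt : i + 1 < cs.length := (List.getElem?_eq_some_iff.mp hcontr).1
                    exact h2 ⟨hsl, hlt, hcontr⟩
                  rw [loopB_slash_irrel _ _ _ hnext]
                  exact ih (i+1) (by omega) d none esc
                · rw [hdrop]
                  simp [loopB, hq, hbr, hbr2, hsl]
                  exact ih (i+1) (by omega) d none esc
    · have hge : cs.length ≤ i := by omega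
      rw [loopA.eq_def]
      simp only [dif_neg h, List.drop_eq_nil_of_le hge]
      cases q <;> rfl

-- ===== VERDICT (by name: the statement is the Claim_ definition above) =====
theorem validate_css_spec : Claim_equal_validate_css := by
  intro raw _
  simp only [Spec_validate_css, validate_css, validate_css_alt]
  by_cases hs : PySem.Chars.strip raw.toList = []
  · rw [if_pos (Or.inr hs), if_pos hs]
  · have hnil : raw.toList ≠ [] := by
      intro h; apply hs; rw [h]; rfl
    rw [if_neg (by rintro (h | h); exacts [hnil h, hs h]), if_neg hs]
    by_cases hlen : 200000 < raw.toList.length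
    · rw [if_pos hlen, if_pos hlen]
    · rw [if_neg hlen, if_neg hlen]
      by_cases hnul : PySem.Chars.isIn [Char.ofNat 0] raw.toList = true
      · rw [if_pos hnul, if_pos hnul]
      · rw [if_neg hnul, if_neg hnul]
        simpa using loop_main raw.toList (raw.toList.length + 1) 0 (by omega) 0 none false
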